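-- pv_equiv track=rewrite | github.com/berhanwa/pythonClassE7 | pset3d/digits.py | check
-- ===== SOURCE A (Python) =====
-- def check(num):
--     multiple = num * 4
--     reversed_number = 0
--
--     # Reverses the number
--     while multiple > 0:
--         digit = multiple % 10
--         reversed_number = (reversed_number * 10) + digit
--         # to remove the last digit
--         multiple //= 10
--
--     # Checks if the reversed number is the same as the original number
--     if reversed_number == num:
--         return True
--     else:
--         return False
-- ===== SOURCE B (Python) =====
-- def check(num):
--     if num <= 0:
--         return num == 0
--     s = str(num * 4)
--     return s[::-1].lstrip('0') == str(num)
-- ===== Notes on version B (the rewrite author's own statement) =====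
-- stated objective: idiomatic
-- what changed: B replaces the %10///10 digit-reversal loop by string formatting: for positive num it reverses the decimal string of num*4, strips the leading zeros and compares it with the decimal string of num; for nonpositive num it answers directly, since A's loop never runs there.
import Mathlib
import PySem

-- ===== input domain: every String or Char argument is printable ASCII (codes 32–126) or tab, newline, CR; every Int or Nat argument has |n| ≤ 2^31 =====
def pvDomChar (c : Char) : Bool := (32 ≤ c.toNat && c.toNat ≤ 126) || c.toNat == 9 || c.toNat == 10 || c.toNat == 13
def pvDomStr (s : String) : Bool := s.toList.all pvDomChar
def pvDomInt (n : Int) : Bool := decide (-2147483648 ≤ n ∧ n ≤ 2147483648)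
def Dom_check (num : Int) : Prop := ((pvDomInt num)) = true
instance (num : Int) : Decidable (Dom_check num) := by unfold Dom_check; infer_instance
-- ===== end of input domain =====

-- ===== PORT A =====
-- B reverses num*4 via its decimal string instead of A's %10///10 arithmetic loop (objective: idiomatic).
def checkLoop (multiple reversed_number : Int) : Int :=
  if multiple > 0 then
    checkLoop (PySem.Int.floordiv multiple 10)
      (reversed_number * 10 + PySem.Int.mod multiple 10)
  else reversed_number
termination_by multiple.toNat
decreasing_by
  rename_i h
  simp only [PySem.Int.floordiv]
  rw [Int.fdiv_eq_ediv, if_pos (Or.inl (by norm_num) : (0:Int) ≤ 10 ∨ (10:Int) ∣ multiple)]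
  omega

def check (num : Int) : Bool :=
  if checkLoop (num * 4) 0 = num then true else false

-- ===== PORT B =====
-- lstrip('0') has no PySem primitive; it is ported exactly as dropWhile (== '0') on the code points,
-- and s[::-1] as List.reverse (= PySem.Str.slice?_none_none_neg_one); string == compares the code points.
def check_alt (num : Int) : Bool :=
  if num ≤ 0 then decide (num = 0)
  else
    let s : String := PySem.Int.toStr (num * 4)
    decide (List.dropWhile (fun c => c == '0') s.toList.reverse = (PySem.Int.toStr num).toList)

-- ===== PRECONDITION & SPEC =====
def Spec_check (num : Int) (out : Bool) : Prop := out = check_alt num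
instance (num : Int) (out : Bool) : Decidable (Spec_check num out) := by unfold Spec_check; infer_instance

-- ===== CLAIM (what is proved, stated in full; the proofs are below) =====
def Claim_equal_check : Prop := ∀ (num : Int), Dom_check num → Spec_check num (check num)

-- ===== LEMMAS AND PROOFS =====

theorem ite_tf (p : Prop) [Decidable p] : (if p then true else false) = decide p := by
  by_cases h : p <;> simp [h]

theorem checkLoop_nonpos (multiple acc : Int) (h : multiple ≤ 0) : checkLoop multiple acc = acc := by
  unfold checkLoop; simp [show ¬ multiple > 0 by omega]

theorem checkLoop_natCast (m : Nat) (acc : Int) :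
    checkLoop (m : Int) acc
      = (Nat.digits 10 m).foldl (fun (r : Int) (d : Nat) => r * 10 + (d : Int)) acc := by
  induction m using Nat.strong_induction_on generalizing acc with
  | _ m ih =>
    rcases Nat.eq_zero_or_pos m with hm | hm
    · subst hm; simp [checkLoop_nonpos]
    · rw [Nat.digits_def' (by norm_num : 1 < 10) hm]
      unfold checkLoop
      have hpos : (0:Int) < (m : Int) := by exact_mod_cast hm
      rw [if_pos hpos]
      have hfd : PySem.Int.floordiv (m : Int) 10 = ((m / 10 : Nat) : Int) := by
        simp only [PySem.Int.floordiv]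
        rw [Int.fdiv_eq_ediv, if_pos (Or.inl (by norm_num) : (0:Int) ≤ 10 ∨ (10:Int) ∣ (m:Int))]
        omega
      have hmd : PySem.Int.mod (m : Int) 10 = ((m % 10 : Nat) : Int) := by
        simp only [PySem.Int.mod]
        rw [Int.fmod_eq_emod, if_pos (Or.inl (by norm_num) : (0:Int) ≤ 10 ∨ (10:Int) ∣ (m:Int))]
        omega
      rw [hfd, hmd, ih (m / 10) (Nat.div_lt_self hm (by norm_num))]
      simp

theorem foldl_horner (l : List Nat) (acc : Int) :
    l.foldl (fun (r : Int) (d : Nat) => r * 10 + (d : Int)) acc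
      = acc * 10 ^ l.length + ((Nat.ofDigits 10 l.reverse : Nat) : Int) := by
  induction l generalizing acc with
  | nil => simp
  | cons x xs ih =>
    simp only [List.foldl_cons, List.reverse_cons, List.length_cons]
    rw [ih, Nat.ofDigits_append]
    push_cast [Nat.ofDigits_singleton, List.length_reverse]
    ring

theorem ofDigits_zeros (l : List Nat) (h : ∀ x ∈ l, x = 0) : Nat.ofDigits 10 l = 0 := by
  induction l with
  | nil => simp [Nat.ofDigits_nil]
  | cons x xs ih =>
    rw [Nat.ofDigits_cons, h x (by simp), ih (fun y hy => h y (by simp [hy]))]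

theorem toDigitsCore_eq (fuel n : Nat) (acc : List Char) (hn : 0 < n) (hf : n ≤ fuel) :
    Nat.toDigitsCore 10 fuel n acc = ((Nat.digits 10 n).map Nat.digitChar).reverse ++ acc := by
  induction fuel generalizing n acc with
  | zero => omega
  | succ fuel ih =>
    rw [Nat.digits_def' (by norm_num : 1 < 10) hn]
    simp only [Nat.toDigitsCore]
    by_cases h10 : n / 10 = 0
    · simp [h10]
    · rw [if_neg h10, ih (n / 10) _ (Nat.pos_of_ne_zero h10) (by
        have := Nat.div_lt_self hn (by norm_num : 1 < 10); omega)]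
      simp

theorem toDigits_eq_digits (n : Nat) (hn : 0 < n) :
    Nat.toDigits 10 n = ((Nat.digits 10 n).map Nat.digitChar).reverse := by
  rw [Nat.toDigits, toDigitsCore_eq (n + 1) n [] hn (by omega)]
  simp

theorem digitChar_toNat (d : Nat) (hd : d < 10) : (Nat.digitChar d).toNat = 48 + d := by
  interval_cases d <;> rfl

theorem map_digitChar_inj (l1 l2 : List Nat) (h1 : ∀ x ∈ l1, x < 10) (h2 : ∀ x ∈ l2, x < 10)
    (h : l1.map Nat.digitChar = l2.map Nat.digitChar) : l1 = l2 := by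
  induction l1 generalizing l2 with
  | nil => cases l2 <;> simp_all
  | cons x xs ih =>
    cases l2 with
    | nil => simp_all
    | cons y ys =>
      simp only [List.map_cons, List.cons.injEq] at h
      have hx := h1 x (by simp)
      have hy := h2 y (by simp)
      have hxy : x = y := by
        have := congrArg Char.toNat h.1
        rw [digitChar_toNat x hx, digitChar_toNat y hy] at this
        omega
      rw [hxy, ih ys (fun z hz => h1 z (by simp [hz])) (fun z hz => h2 z (by simp [hz])) h.2]

theorem dropWhile_congr_mem {α : Type} (p q : α → Bool) (l : List α)
    (h : ∀ x ∈ l, p x = q x) : List.dropWhile p l = List.dropWhile q l := by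
  induction l with
  | nil => rfl
  | cons x xs ih =>
    rw [List.dropWhile_cons, List.dropWhile_cons, h x (by simp)]
    split
    · exact ih (fun z hz => h z (by simp [hz]))
    · rfl

theorem key_iff (M n : Nat) (hn : 0 < n) :
    (List.dropWhile (fun d => d == 0) (Nat.digits 10 M) = (Nat.digits 10 n).reverse)
      ↔ Nat.ofDigits 10 (Nat.digits 10 M).reverse = n := by
  set l := Nat.digits 10 M with hl
  have hsplit : l.takeWhile (fun d => d == 0) ++ l.dropWhile (fun d => d == 0) = l :=
    List.takeWhile_append_dropWhile
  have htake : ∀ x ∈ (l.takeWhile (fun d => d == 0)).reverse, x = 0 := by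
    intro x hx
    have := List.mem_takeWhile_imp (List.mem_reverse.mp hx)
    simpa using this
  have hdec : Nat.ofDigits 10 l.reverse
      = Nat.ofDigits 10 ((l.dropWhile (fun d => d == 0)).reverse) := by
    conv_lhs => rw [← hsplit]
    rw [List.reverse_append, Nat.ofDigits_append,
      ofDigits_zeros ((l.takeWhile (fun d => d == 0)).reverse) htake]
    simp
  constructor
  · intro hdw
    rw [hdec, hdw, List.reverse_reverse, Nat.ofDigits_digits]
  · intro hof
    have hdne : l.dropWhile (fun d => d == 0) ≠ [] := by
      intro hnil
      rw [hdec, hnil] at hof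
      simp [Nat.ofDigits_nil] at hof
      omega
    have hlt : ∀ x ∈ (l.dropWhile (fun d => d == 0)).reverse, x < 10 := by
      intro x hx
      have : x ∈ l := List.dropWhile_subset _ (List.mem_reverse.mp hx)
      exact Nat.digits_lt_base (by norm_num) this
    have hlast : ∀ (h : (l.dropWhile (fun d => d == 0)).reverse ≠ []),
        ((l.dropWhile (fun d => d == 0)).reverse).getLast h ≠ 0 := by
      intro h
      rw [List.getLast_reverse]
      have hhead := List.head_dropWhile_not (fun d : Nat => d == 0) (l := l) hdne
      simpa using hhead
    have hdig : Nat.digits 10 n = (l.dropWhile (fun d => d == 0)).reverse := by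
      rw [← hof, hdec, Nat.digits_ofDigits 10 (by norm_num) _ hlt hlast]
    rw [hdig, List.reverse_reverse]

theorem main_pos (n : Nat) (hn : 0 < n) :
    check ((n : Int)) = check_alt ((n : Int)) := by
  have hM : 0 < 4 * n := by omega
  have hcast : ((n : Int)) * 4 = ((4 * n : Nat) : Int) := by push_cast; ring
  have hA : check (n : Int) = decide (Nat.ofDigits 10 (Nat.digits 10 (4 * n)).reverse = n) := by
    unfold check
    rw [hcast, checkLoop_natCast, foldl_horner, ite_tf]
    simp only [zero_mul, zero_add]
    rw [decide_eq_decide]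
    exact ⟨fun h => by exact_mod_cast h, fun h => by exact_mod_cast h⟩
  have hchars : ∀ k : Nat, 0 < k →
      (PySem.Int.toStr ((k : Int))).toList = ((Nat.digits 10 k).map Nat.digitChar).reverse := by
    intro k hk
    rw [PySem.Int.toList_toStr]
    simp [PySem.Int.toChars, show ¬ ((k:Int) < 0) by omega]
    rw [toDigits_eq_digits k hk]
  have hB : check_alt (n : Int) = decide
      (List.dropWhile (fun d => d == 0) (Nat.digits 10 (4 * n)) = (Nat.digits 10 n).reverse) := by
    have hstep : check_alt (n : Int) = decide
        (List.dropWhile (fun c => c == '0')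
            (PySem.Int.toStr ((n : Int) * 4)).toList.reverse
          = (PySem.Int.toStr (n : Int)).toList) := by
      unfold check_alt
      rw [if_neg (by omega)]
    rw [hstep, hcast, hchars (4 * n) hM, hchars n hn, List.reverse_reverse,
      List.dropWhile_map, decide_eq_decide]
    rw [dropWhile_congr_mem ((fun c => c == '0') ∘ Nat.digitChar) (fun d => d == 0)
      (Nat.digits 10 (4 * n)) (by
        intro x hx
        have hx10 : x < 10 := Nat.digits_lt_base (by norm_num) hx
        interval_cases x <;> rfl)]
    constructor
    · intro h
      apply map_digitChar_inj
      · intro x hx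
        exact Nat.digits_lt_base (by norm_num) (List.dropWhile_subset _ hx)
      · intro x hx
        exact Nat.digits_lt_base (by norm_num) (List.mem_reverse.mp hx)
      · rw [h, List.map_reverse]
    · intro h
      rw [h, List.map_reverse]
  rw [hA, hB, decide_eq_decide]
  exact (key_iff (4 * n) n hn).symm

-- ===== VERDICT (by name: the statement is the Claim_ definition above) =====
theorem check_spec : Claim_equal_check := by
  intro num _
  unfold Spec_check
  by_cases hle : num ≤ 0
  · unfold check check_alt
    rw [checkLoop_nonpos _ _ (by omega), if_pos hle, ite_tf, decide_eq_decide]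
    omega
  · have hpos : 0 < num := by omega
    have hnum : num = ((num.toNat : Nat) : Int) := by omega
    rw [hnum]
    exact main_pos num.toNat (by omega)
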